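-- pv_equiv track=rewrite | github.com/deavid/flscriptparser | xml2json.py | entity_rep
-- ===== SOURCE A (Python) =====
-- def entity_rep(txt,entities=""):
--     entity_list = list("&'\"<>")
--     entity_dict = {
--         '"' : "&quot;",
--         "'" : "&apos;",
--         '<' : "&lt;",
--         '>' : "&gt;",
--         "&" : "&amp;",
--     }
--     if entities == "": entities = entity_list
--     entities = list(entities)
--     if "&" not in entities: entities.append("&")
--
--     for entity in entity_list:
--         if entity not in entities: continue
--         #print entity,entity_dict[entity]
--         txt = txt.replace(entity,entity_dict[entity])
--     return txt
-- ===== SOURCE B (Python) =====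
-- def entity_rep(txt, entities=""):
--     # single pass over txt with a lookup table instead of five sequential .replace scans
--     table = {
--         '"': "&quot;",
--         "'": "&apos;",
--         '<': "&lt;",
--         '>': "&gt;",
--         "&": "&amp;",
--     }
--     if entities == "":
--         active = set("&'\"<>")
--     else:
--         active = set(entities) | {"&"}
--     return "".join(table[c] if (c in active and c in table) else c for c in txt)
-- ===== Notes on version B (the rewrite author's own statement) =====
-- stated objective: simpler
-- what changed: Replaces five sequential str.replace scans (each rebuilding the whole string) by one character-by-character pass with a dict lookup over the active entity set.
import Mathlib
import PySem

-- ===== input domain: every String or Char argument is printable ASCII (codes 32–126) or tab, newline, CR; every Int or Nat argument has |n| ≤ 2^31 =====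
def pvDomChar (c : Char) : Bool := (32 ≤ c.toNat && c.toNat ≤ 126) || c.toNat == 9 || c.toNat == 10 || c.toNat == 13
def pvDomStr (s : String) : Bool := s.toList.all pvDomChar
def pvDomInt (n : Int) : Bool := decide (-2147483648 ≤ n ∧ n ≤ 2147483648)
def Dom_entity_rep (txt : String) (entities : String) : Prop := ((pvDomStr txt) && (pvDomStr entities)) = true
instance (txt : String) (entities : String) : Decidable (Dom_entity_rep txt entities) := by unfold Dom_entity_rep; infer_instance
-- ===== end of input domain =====

-- B replaces A's five sequential str.replace scans by one character-by-character pass with a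
-- dict lookup over the active entity set (objective: a simpler single pass, same result).

-- ===== PORT A =====
-- literal transliteration of A: build entity_list/entity_dict, normalise entities, then loop
-- over entity_list applying txt.replace for each active entity ('continue' = the else branch).
-- entity_dict[entity] is ported as (get? …).getD "": every entity of entity_list is a key of
-- entity_dict, so the default is never used and no KeyError is reachable (A is total).
def entity_rep (txt : String) (entities : String) : String :=
  let entity_list : List Char := "&'\"<>".toList
  let entity_dict : PySem.Dict Char String :=
    PySem.Dict.ofList [('"', "&quot;"), ('\'', "&apos;"), ('<', "&lt;"), ('>', "&gt;"), ('&', "&amp;")]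
  let entities1 : List Char := if entities = "" then entity_list else entities.toList
  let entities2 : List Char := if '&' ∈ entities1 then entities1 else entities1 ++ ['&']
  entity_list.foldl
    (fun t entity =>
      if entity ∈ entities2 then
        PySem.Str.replace t (String.ofList [entity]) ((entity_dict.get? entity).getD "")
      else t)
    txt

-- ===== PORT B =====
-- literal transliteration of Source B: lookup table, active set, one "".join over a per-character map.
def entity_rep_alt (txt : String) (entities : String) : String :=
  let table : PySem.Dict Char String :=
    PySem.Dict.ofList [('"', "&quot;"), ('\'', "&apos;"), ('<', "&lt;"), ('>', "&gt;"), ('&', "&amp;")]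
  let active : PySem.Set Char :=
    if entities = "" then PySem.Set.ofList "&'\"<>".toList
    else PySem.Set.union (PySem.Set.ofList entities.toList) (PySem.Set.ofList ['&'])
  PySem.Str.join ""
    (txt.toList.map (fun c =>
      if PySem.Set.contains active c = true ∧ (table.get? c).isSome = true then
        (table.get? c).getD ""
      else String.ofList [c]))

-- ===== PRECONDITION & SPEC =====
def Spec_entity_rep (txt : String) (entities : String) (out : String) : Prop := out = entity_rep_alt txt entities
instance (txt : String) (entities : String) (out : String) : Decidable (Spec_entity_rep txt entities out) := by unfold Spec_entity_rep; infer_instance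

-- ===== CLAIM (what is proved, stated in full; the proofs are below) =====
def Claim_equal_entity_rep : Prop := ∀ (txt : String) (entities : String), Dom_entity_rep txt entities → Spec_entity_rep txt entities (entity_rep txt entities)

-- ===== LEMMAS AND PROOFS =====

-- the entity table, shared by the lemmas below (definitionally the dict both ports build)
def pvTable : PySem.Dict Char String :=
  PySem.Dict.ofList [('"', "&quot;"), ('\'', "&apos;"), ('<', "&lt;"), ('>', "&gt;"), ('&', "&amp;")]

theorem pv_flatMap_flatMap (xs : List Char) (f g : Char → List Char) :
    (xs.flatMap f).flatMap g = xs.flatMap (fun x => (f x).flatMap g) := by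
  induction xs <;> simp_all

theorem pv_flatMap_ext (xs : List Char) (f g : Char → List Char) (h : ∀ x, f x = g x) :
    xs.flatMap f = xs.flatMap g := by
  induction xs <;> simp_all

-- single-character str.replace is a flatMap
theorem pv_go_single (c : Char) (r : List Char) :
    ∀ (fuel : Nat) (s acc : List Char), s.length ≤ fuel →
      PySem.Chars.replace.go [c] r fuel s acc
        = acc.reverse ++ s.flatMap (fun x => if x = c then r else [x]) := by
  intro fuel
  induction fuel with
  | zero =>
    intro s acc h
    have : s = [] := List.length_eq_zero_iff.mp (Nat.le_zero.mp h)
    subst this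
    simp [PySem.Chars.replace.go]
  | succ n ih =>
    intro s acc h
    cases s with
    | nil => simp [PySem.Chars.replace.go]
    | cons x t =>
      simp only [PySem.Chars.replace.go, List.isPrefixOf, Bool.and_true, beq_iff_eq,
        List.flatMap_cons, List.length_cons, List.drop_succ_cons, List.length_nil, List.drop_zero]
      by_cases hx : c = x
      · rw [if_pos hx, if_pos hx.symm, ih t (r.reverse ++ acc) (Nat.le_of_succ_le_succ h)]
        simp
      · rw [if_neg hx, if_neg (Ne.symm hx), ih t (x :: acc) (Nat.le_of_succ_le_succ h)]
        simp

theorem pv_replace_single (c : Char) (r s : List Char) :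
    PySem.Chars.replace s [c] r = s.flatMap (fun x => if x = c then r else [x]) := by
  rw [PySem.Chars.replace]
  simp only [List.isEmpty_cons, Bool.false_eq_true, if_false]
  rw [pv_go_single c r s.length s [] le_rfl]
  simp

-- one conditional replace stage of A's loop, at the List Char level
theorem pv_stage (b : Prop) [Decidable b] (c : Char) (r : String) (t : String) :
    (if b then PySem.Str.replace t (String.ofList [c]) r else t).toList
      = t.toList.flatMap (fun x => if x = c ∧ b then r.toList else [x]) := by
  by_cases hb : b
  · simp only [if_pos hb, PySem.Str.replace, String.toList_ofList, pv_replace_single]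
    exact pv_flatMap_ext _ _ _ (fun x => by by_cases hx : x = c <;> simp [hx, hb])
  · simp only [if_neg hb]
    have : t.toList.flatMap (fun x => if x = c ∧ b then r.toList else [x])
        = t.toList.flatMap (fun x : Char => [x]) :=
      pv_flatMap_ext _ _ _ (fun x => by simp [hb])
    rw [this]; simp

theorem pv_get?_none (x : Char) (h1 : x ≠ '&') (h2 : x ≠ '\'') (h3 : x ≠ '"')
    (h4 : x ≠ '<') (h5 : x ≠ '>') : pvTable.get? x = none := by
  simp [PySem.Dict.get?,
    show pvTable.items = [('"', "&quot;"), ('\'', "&apos;"), ('<', "&lt;"), ('>', "&gt;"), ('&', "&amp;")] from by decide,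
    List.find?, beq_eq_false_iff_ne.mpr (Ne.symm h1), beq_eq_false_iff_ne.mpr (Ne.symm h2),
    beq_eq_false_iff_ne.mpr (Ne.symm h3), beq_eq_false_iff_ne.mpr (Ne.symm h4),
    beq_eq_false_iff_ne.mpr (Ne.symm h5)]

-- A's five-stage chain applied to one character equals B's per-character piece
theorem pv_piece (E : List Char) (S : PySem.Set Char) (hamp : '&' ∈ E)
    (hS : ∀ y, y ∈ ("&'\"<>".toList : List Char) → (y ∈ S ↔ y ∈ E)) (x : Char) :
    (((([x].flatMap (fun y => if y = '&' ∧ '&' ∈ E then "&amp;".toList else [y])).flatMap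
        (fun y => if y = '\'' ∧ '\'' ∈ E then "&apos;".toList else [y])).flatMap
        (fun y => if y = '"' ∧ '"' ∈ E then "&quot;".toList else [y])).flatMap
        (fun y => if y = '<' ∧ '<' ∈ E then "&lt;".toList else [y])).flatMap
        (fun y => if y = '>' ∧ '>' ∈ E then "&gt;".toList else [y])
      = (if PySem.Set.contains S x = true ∧ (pvTable.get? x).isSome = true then
          (pvTable.get? x).getD ""
        else String.ofList [x]).toList := by
  have hmem : ∀ y, y ∈ ("&'\"<>".toList : List Char) → (PySem.Set.contains S y = true ↔ y ∈ E) := by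
    intro y hy; rw [PySem.Set.contains_iff]; exact hS y hy
  by_cases h1 : x = '&'
  · subst h1
    rw [if_pos ⟨(hmem '&' (by decide)).mpr hamp, by decide⟩]
    simp [hamp, show pvTable.get? '&' = some "&amp;" from by decide]
  · by_cases h2 : x = '\''
    · subst h2
      by_cases hx : '\'' ∈ E
      · rw [if_pos ⟨(hmem '\'' (by decide)).mpr hx, by decide⟩]
        simp [hx, show pvTable.get? '\'' = some "&apos;" from by decide]
      · rw [if_neg (fun hc => hx ((hmem '\'' (by decide)).mp hc.1))]
        simp [hx]
    · by_cases h3 : x = '"'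
      · subst h3
        by_cases hx : '"' ∈ E
        · rw [if_pos ⟨(hmem '"' (by decide)).mpr hx, by decide⟩]
          simp [hx, show pvTable.get? '"' = some "&quot;" from by decide]
        · rw [if_neg (fun hc => hx ((hmem '"' (by decide)).mp hc.1))]
          simp [hx]
      · by_cases h4 : x = '<'
        · subst h4
          by_cases hx : '<' ∈ E
          · rw [if_pos ⟨(hmem '<' (by decide)).mpr hx, by decide⟩]
            simp [hx, show pvTable.get? '<' = some "&lt;" from by decide]
          · rw [if_neg (fun hc => hx ((hmem '<' (by decide)).mp hc.1))]
            simp [hx]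
        · by_cases h5 : x = '>'
          · subst h5
            by_cases hx : '>' ∈ E
            · rw [if_pos ⟨(hmem '>' (by decide)).mpr hx, by decide⟩]
              simp [hx, show pvTable.get? '>' = some "&gt;" from by decide]
            · rw [if_neg (fun hc => hx ((hmem '>' (by decide)).mp hc.1))]
              simp [hx]
          · rw [if_neg (fun hc => by
              rw [pv_get?_none x h1 h2 h3 h4 h5] at hc
              exact absurd hc.2 (by simp))]
            simp [h1, h2, h3, h4, h5]

-- both sides for a fixed active list E (A's entities2) and active set S (B's active)
theorem pv_main (txt : String) (E : List Char) (S : PySem.Set Char) (hamp : '&' ∈ E)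
    (hS : ∀ y, y ∈ ("&'\"<>".toList : List Char) → (y ∈ S ↔ y ∈ E)) :
    (("&'\"<>".toList : List Char).foldl
      (fun t entity =>
        if entity ∈ E then
          PySem.Str.replace t (String.ofList [entity]) ((pvTable.get? entity).getD "")
        else t) txt)
    = PySem.Str.join ""
        (txt.toList.map (fun c =>
          if PySem.Set.contains S c = true ∧ (pvTable.get? c).isSome = true then
            (pvTable.get? c).getD ""
          else String.ofList [c])) := by
  apply String.toList_inj.mp
  show (List.foldl _ txt ['&', '\'', '"', '<', '>']).toList = _
  simp only [List.foldl_cons, List.foldl_nil,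
    show pvTable.get? '&' = some "&amp;" from by decide,
    show pvTable.get? '\'' = some "&apos;" from by decide,
    show pvTable.get? '"' = some "&quot;" from by decide,
    show pvTable.get? '<' = some "&lt;" from by decide,
    show pvTable.get? '>' = some "&gt;" from by decide,
    Option.getD_some]
  rw [pv_stage ('>' ∈ E) '>' "&gt;",
      pv_stage ('<' ∈ E) '<' "&lt;",
      pv_stage ('"' ∈ E) '"' "&quot;",
      pv_stage ('\'' ∈ E) '\'' "&apos;",
      pv_stage ('&' ∈ E) '&' "&amp;"]
  rw [pv_flatMap_flatMap, pv_flatMap_flatMap, pv_flatMap_flatMap, pv_flatMap_flatMap]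
  rw [PySem.Str.toList_join]
  have hjoin : ∀ (l : List (List Char)), PySem.Chars.join [] l = l.flatten := by
    intro l
    induction l with
    | nil => rfl
    | cons a t ih => cases t <;> simp_all [PySem.Chars.join, List.intercalate, List.intersperse]
  rw [show ("" : String).toList = [] from rfl, hjoin, List.map_map, ← List.flatMap_def]
  exact pv_flatMap_ext _ _ _ (fun x => by simpa [pv_flatMap_flatMap] using pv_piece E S hamp hS x)

-- ===== VERDICT (by name: the statement is the Claim_ definition above) =====
theorem entity_rep_spec : Claim_equal_entity_rep := by
  intro txt entities _hDom
  unfold Spec_entity_rep entity_rep entity_rep_alt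
  by_cases he : entities = ""
  · simp only [he, reduceIte, show ('&' ∈ ("&'\"<>".toList : List Char)) = True from by simp]
    exact pv_main txt _ _ (by decide) (fun y hy => by rw [PySem.Set.mem_ofList])
  · simp only [he, reduceIte]
    by_cases ha : '&' ∈ entities.toList
    · simp only [if_pos ha]
      refine pv_main txt _ _ ha (fun y hy => ?_)
      rw [PySem.Set.mem_union, PySem.Set.mem_ofList, PySem.Set.mem_ofList]
      constructor
      · rintro (h | h)
        · exact h
        · simp at h; subst h; exact ha
      · exact Or.inl
    · simp only [if_neg ha]
      refine pv_main txt _ _ (by simp) (fun y hy => ?_)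
      rw [PySem.Set.mem_union, PySem.Set.mem_ofList, PySem.Set.mem_ofList]
      simp
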